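-- pv_equiv track=rewrite | github.com/PardheevKrishna/dehado-ai | donut_train/train.py | compute_field_and_document_stats
-- ===== SOURCE A (Python) =====
-- def compute_field_and_document_stats(preds, gts, keys):
--     # Field-level
--     correct_fields = sum(1 for p, g in zip(preds, gts) if p.strip() == g.strip())
--     total_fields   = len(gts)
--     wrong_fields   = total_fields - correct_fields
--
--     # Document-level
--     doc_groups = {}
--     for key, p, g in zip(keys, preds, gts):
--         doc_id = key.rsplit('_', 1)[0]
--         doc_groups.setdefault(doc_id, []).append((p.strip(), g.strip()))
--     correct_docs = sum(1 for pairs in doc_groups.values() if all(p == g for p, g in pairs))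
--     total_docs   = len(doc_groups)
--     wrong_docs   = total_docs - correct_docs
--
--     return (correct_fields, wrong_fields, total_fields,
--             correct_docs, wrong_docs, total_docs)
-- ===== SOURCE B (Python) =====
-- def compute_field_and_document_stats(preds, gts, keys):
--     # Field-level: precompute a boolean correctness list
--     ok = [p.strip() == g.strip() for p, g in zip(preds, gts)]
--     correct_fields = sum(1 for o in ok if o)
--     total_fields = len(gts)
--
--     # Document-level by set algebra: a document is correct iff its id never
--     # carries a wrong field, so correct docs = all doc ids minus the bad ones
--     ids = [k.rsplit('_', 1)[0] for k, _ in zip(keys, ok)]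
--     bad = {i for i, o in zip(ids, ok) if not o}
--     docs = set(ids)
--     total_docs = len(docs)
--     correct_docs = len(docs - bad)
--     return (correct_fields, total_fields - correct_fields, total_fields,
--             correct_docs, total_docs - correct_docs, total_docs)
-- ===== Notes on version B (the rewrite author's own statement) =====
-- stated objective: alternative
-- what changed: B eliminates A's dict of per-document pair lists: it precomputes a boolean correctness list and derives the document level by set algebra, correct_docs = len(set(ids) - {ids with a wrong field}), instead of grouping pairs per document and rescanning each group with all(...).
import Mathlib
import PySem

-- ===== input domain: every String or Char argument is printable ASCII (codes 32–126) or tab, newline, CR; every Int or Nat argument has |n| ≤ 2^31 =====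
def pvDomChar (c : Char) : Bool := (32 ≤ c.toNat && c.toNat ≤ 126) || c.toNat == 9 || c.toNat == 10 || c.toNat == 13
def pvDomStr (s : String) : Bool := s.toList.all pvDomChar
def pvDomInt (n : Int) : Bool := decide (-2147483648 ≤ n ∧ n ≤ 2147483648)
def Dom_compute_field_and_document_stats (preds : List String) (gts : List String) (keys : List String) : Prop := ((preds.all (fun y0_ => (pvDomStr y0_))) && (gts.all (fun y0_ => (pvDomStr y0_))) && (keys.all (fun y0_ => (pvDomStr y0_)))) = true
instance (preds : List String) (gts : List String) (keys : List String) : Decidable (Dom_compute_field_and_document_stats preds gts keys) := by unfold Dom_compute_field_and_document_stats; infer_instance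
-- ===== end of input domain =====

-- B drops A's dict of per-document pair lists entirely: it precomputes a boolean
-- correctness list and computes the document level by set algebra — the set of
-- all doc ids minus the set of ids carrying a wrong field (objective: alternative).

-- shared helper: key.rsplit('_', 1)[0] — everything before the LAST '_', or the whole
-- string if it contains no '_' (exact hand port; PySem has no rsplit)
def rsplitHead (s : String) : String :=
  match s.toList.reverse.dropWhile (fun c => !(c == '_')) with
  | [] => s
  | _ :: t => String.ofList t.reverse

-- ===== PORT A =====
def compute_field_and_document_stats (preds : List String) (gts : List String) (keys : List String) : Int × Int × Int × Int × Int × Int :=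
  let correct_fields : Int :=
    (preds.zip gts).foldl
      (fun acc pg => if PySem.Str.strip pg.1 == PySem.Str.strip pg.2 then acc + 1 else acc) 0
  let total_fields : Int := (gts.length : Int)
  let wrong_fields : Int := total_fields - correct_fields
  -- doc_groups.setdefault(doc_id, []).append((p.strip(), g.strip()))
  let doc_groups : PySem.Dict String (List (String × String)) :=
    (keys.zip (preds.zip gts)).foldl
      (fun d x => d.modify (rsplitHead x.1) []
        (fun l => l ++ [(PySem.Str.strip x.2.1, PySem.Str.strip x.2.2)]))
      PySem.Dict.empty
  let correct_docs : Int :=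
    doc_groups.values.foldl
      (fun acc pairs => if pairs.all (fun pg => pg.1 == pg.2) then acc + 1 else acc) 0
  let total_docs : Int := (doc_groups.size : Int)
  let wrong_docs : Int := total_docs - correct_docs
  (correct_fields, wrong_fields, total_fields, correct_docs, wrong_docs, total_docs)

-- ===== PORT B =====
def compute_field_and_document_stats_alt (preds : List String) (gts : List String) (keys : List String) : Int × Int × Int × Int × Int × Int :=
  -- ok = [p.strip() == g.strip() for p, g in zip(preds, gts)]
  let ok : List Bool :=
    (preds.zip gts).map (fun pg => PySem.Str.strip pg.1 == PySem.Str.strip pg.2)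
  let correct_fields : Int := ok.foldl (fun acc o => if o then acc + 1 else acc) 0
  let total_fields : Int := (gts.length : Int)
  -- ids = [k.rsplit('_', 1)[0] for k, _ in zip(keys, ok)]
  let ids : List String := (keys.zip ok).map (fun x => rsplitHead x.1)
  -- bad = {i for i, o in zip(ids, ok) if not o}  (set comprehension)
  let bad : PySem.Set String :=
    PySem.Set.ofList (((ids.zip ok).filter (fun io => !io.2)).map (fun io => io.1))
  -- docs = set(ids)
  let docs : PySem.Set String := PySem.Set.ofList ids
  let total_docs : Int := PySem.Set.len docs
  -- correct_docs = len(docs - bad)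
  let correct_docs : Int := PySem.Set.len (PySem.Set.diff docs bad)
  (correct_fields, total_fields - correct_fields, total_fields,
   correct_docs, total_docs - correct_docs, total_docs)

-- ===== PRECONDITION & SPEC =====
def Spec_compute_field_and_document_stats (preds : List String) (gts : List String) (keys : List String) (out : Int × Int × Int × Int × Int × Int) : Prop := out = compute_field_and_document_stats_alt preds gts keys
instance (preds : List String) (gts : List String) (keys : List String) (out : Int × Int × Int × Int × Int × Int) : Decidable (Spec_compute_field_and_document_stats preds gts keys out) := by unfold Spec_compute_field_and_document_stats; infer_instance

-- ===== CLAIM (what is proved, stated in full; the proofs are below) =====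
def Claim_equal_compute_field_and_document_stats : Prop := ∀ (preds : List String) (gts : List String) (keys : List String), Dom_compute_field_and_document_stats preds gts keys → Spec_compute_field_and_document_stats preds gts keys (compute_field_and_document_stats preds gts keys)

-- ===== LEMMAS AND PROOFS =====

-- zip(ids, ok) pairs each doc id with the correctness bit of the SAME position:
-- both are images of the common triple zip, so the mixed zip is one map over it
lemma pv_ids_zip_ok (keys preds gts : List String) (f : String × String → Bool)
    (h : String → String) :
    ((keys.zip ((preds.zip gts).map f)).map (fun x => h x.1)).zip ((preds.zip gts).map f)
      = (keys.zip (preds.zip gts)).map (fun x => (h x.1, f x.2)) := by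
  induction keys generalizing preds gts with
  | nil => simp
  | cons k ks ih =>
    cases preds with
    | nil => simp
    | cons p ps =>
      cases gts with
      | nil => simp
      | cons g gs => simp [ih ps gs]

-- the id list itself is the same map over the triple zip
lemma pv_ids_eq (keys preds gts : List String) (f : String × String → Bool)
    (h : String → String) :
    (keys.zip ((preds.zip gts).map f)).map (fun x => h x.1)
      = (keys.zip (preds.zip gts)).map (fun x => h x.1) := by
  induction keys generalizing preds gts with
  | nil => simp
  | cons k ks ih =>
    cases preds with
    | nil => simp
    | cons p ps =>
      cases gts with
      | nil => simp
      | cons g gs => simp [ih ps gs]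

-- the keys of A's grouping dict: the distinct doc ids in first-occurrence order
lemma pvA_keys (L : List (String × String × String)) :
    (L.foldl (fun d x => d.modify (rsplitHead x.1) []
        (fun l => l ++ [(PySem.Str.strip x.2.1, PySem.Str.strip x.2.2)]))
      PySem.Dict.empty).keys
      = PySem.Set.ofList (L.map (fun x => rsplitHead x.1)) := by
  rw [PySem.Dict.keys_foldl_modify_key]
  simp [PySem.Dict.keys_empty, PySem.Set.update_nil_left]

-- the group stored under id c: the stripped pairs of the positions carrying c
lemma pvA_getD (L : List (String × String × String)) (c : String) :
    (L.foldl (fun d x => d.modify (rsplitHead x.1) []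
        (fun l => l ++ [(PySem.Str.strip x.2.1, PySem.Str.strip x.2.2)]))
      PySem.Dict.empty).getD c []
      = (L.filter (fun x => rsplitHead x.1 == c)).map
          (fun x => (PySem.Str.strip x.2.1, PySem.Str.strip x.2.2)) := by
  rw [show (L.foldl (fun d x => d.modify (rsplitHead x.1) []
        (fun l => l ++ [(PySem.Str.strip x.2.1, PySem.Str.strip x.2.2)]))
      PySem.Dict.empty)
      = ((L.map (fun x => (rsplitHead x.1,
          (PySem.Str.strip x.2.1, PySem.Str.strip x.2.2)))).foldl
          (fun d p => d.modify p.1 [] (fun l => l ++ [p.2])) PySem.Dict.empty) from by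
    rw [List.foldl_map]]
  rw [PySem.Dict.getD_foldl_modify_append]
  simp [List.filter_map, Function.comp_def]

lemma pvA_values (L : List (String × String × String)) :
    (L.foldl (fun d x => d.modify (rsplitHead x.1) []
        (fun l => l ++ [(PySem.Str.strip x.2.1, PySem.Str.strip x.2.2)]))
      PySem.Dict.empty).values
      = (PySem.Set.ofList (L.map (fun x => rsplitHead x.1))).map
          (fun c => (L.filter (fun x => rsplitHead x.1 == c)).map
            (fun x => (PySem.Str.strip x.2.1, PySem.Str.strip x.2.2))) := by
  have hnd : (L.foldl (fun d x => d.modify (rsplitHead x.1) []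
        (fun l => l ++ [(PySem.Str.strip x.2.1, PySem.Str.strip x.2.2)]))
      PySem.Dict.empty).keys.Nodup := by
    rw [pvA_keys]; exact PySem.Set.nodup_ofList _
  rw [PySem.Dict.values_eq_map_keys _ hnd [], pvA_keys]
  simp only [pvA_getD]

lemma pvA_size (L : List (String × String × String)) :
    (L.foldl (fun d x => d.modify (rsplitHead x.1) []
        (fun l => l ++ [(PySem.Str.strip x.2.1, PySem.Str.strip x.2.2)]))
      PySem.Dict.empty).size
      = (PySem.Set.ofList (L.map (fun x => rsplitHead x.1))).length := by
  have h := congrArg List.length (pvA_keys L)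
  simpa [PySem.Dict.keys, PySem.Dict.size] using h

-- A's all-over-stored-group equals the filtered scan of (id, ok) pairs, per document
lemma pv_doc (L : List (String × String × String)) (c : String) :
    ((L.filter (fun x => rsplitHead x.1 == c)).map
        (fun x => (PySem.Str.strip x.2.1, PySem.Str.strip x.2.2))).all
      (fun pg => pg.1 == pg.2)
      = ((L.map (fun x => (rsplitHead x.1,
            PySem.Str.strip x.2.1 == PySem.Str.strip x.2.2))).filter
          (fun io => io.1 == c)).all (fun io => io.2) := by
  simp [List.all_map, List.filter_map, Function.comp_def]

-- "d is not a bad id" is exactly "every (id, ok) pair at id d is ok"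
lemma pv_bad (M : List (String × Bool)) (d : String) :
    (!(PySem.Set.contains
        (PySem.Set.ofList ((M.filter (fun io => !io.2)).map (fun io => io.1))) d))
      = (M.filter (fun io => io.1 == d)).all (fun io => io.2) := by
  rw [Bool.eq_iff_iff]
  simp only [Bool.not_eq_eq_eq_not, Bool.not_true, PySem.Set.contains_eq_listContains,
    List.contains_eq_mem, PySem.Set.mem_ofList, List.mem_map, List.mem_filter,
    List.all_eq_true, decide_eq_false_iff_not, not_exists, not_and,
    beq_iff_eq]
  constructor
  · intro h io him
    by_contra hb
    exact h io ⟨him.1, by simpa using hb⟩ him.2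
  · intro h io hio hd
    have := h io ⟨hio.1, hd⟩
    simp [hio.2] at this

-- ===== VERDICT (by name: the statement is the Claim_ definition above) =====
theorem compute_field_and_document_stats_spec : Claim_equal_compute_field_and_document_stats := by
  intro preds gts keys _
  unfold Spec_compute_field_and_document_stats
  simp only [compute_field_and_document_stats, compute_field_and_document_stats_alt]
  rw [pv_ids_zip_ok keys preds gts
      (fun pg => PySem.Str.strip pg.1 == PySem.Str.strip pg.2) rsplitHead]
  simp only [pv_ids_eq keys preds gts
      (fun pg => PySem.Str.strip pg.1 == PySem.Str.strip pg.2) rsplitHead]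
  simp only [PySem.Set.len, PySem.Set.diff, List.countP_eq_length_filter, List.foldl_map,
    pvA_values, pvA_size, PySem.List.foldl_if_add_one, zero_add,
    pv_bad, pv_doc]
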